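-- pv_equiv track=rewrite | github.com/ts-azure-services/drift-primer | modeling/create_new_data.py | integer_alignment
-- ===== SOURCE A (Python) =====
-- def integer_alignment(
--         base_list=None,
--         change_list=None,
--         target=None,
--         ):
--     """Align float values to the targeted integer total"""
--     # Get the sum of the base and the list to change
--     base_list_sum=sum(base_list)
--     change_list_sum=sum(change_list)
--
--     # Compare against the target, and iterate
--     if base_list_sum == target:
--         pass
--     elif base_list_sum < target:
--         # Then +1, for each list item
--         i = 0
--         while change_list_sum != target:
--             # Keep iterating through if you come to the end of the list
--             if i > len(change_list) - 1:
--                 i = 0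
--             else:
--                 change_list[i] = change_list[i] + 1
--                 change_list_sum = sum(change_list)
--                 i += 1
--     else:
--         # Then -1, for each list item
--         i = 0
--         while change_list_sum != target:
--             if i > len(change_list) - 1:
--                 i = 0
--             else:
--                 change_list[i] = change_list[i] - 1
--                 change_list_sum = sum(change_list)
--                 i += 1
--     return base_list, change_list, base_list_sum, change_list_sum
-- ===== SOURCE B (Python) =====
-- def integer_alignment(
--         base_list=None,
--         change_list=None,
--         target=None,
--         ):
--     """Align float values to the targeted integer total.
--
--     Closed-form round-robin: distribute the whole difference in one pass
--     (q = D // n to every element, one extra unit to the first D % n).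
--     Mutates change_list in place, like the original.
--     """
--     base_sum = sum(base_list)
--     change_sum = sum(change_list)
--     if base_sum != target:
--         delta = target - change_sum
--         if delta != 0:
--             step = 1 if base_sum < target else -1
--             q, r = divmod(abs(delta), len(change_list))
--             change_list[:] = [x + step * (q + (1 if j < r else 0))
--                               for j, x in enumerate(change_list)]
--             change_sum = target
--     return base_list, change_list, base_sum, change_sum
-- ===== Notes on version B (the rewrite author's own statement) =====
-- stated objective: faster
-- what changed: Replaces the unit-step while loop (which re-sums the list after every single increment) with a closed-form round-robin distribution: each element gets D//n, the first D%n elements one more, in a single pass.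
import Mathlib
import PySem

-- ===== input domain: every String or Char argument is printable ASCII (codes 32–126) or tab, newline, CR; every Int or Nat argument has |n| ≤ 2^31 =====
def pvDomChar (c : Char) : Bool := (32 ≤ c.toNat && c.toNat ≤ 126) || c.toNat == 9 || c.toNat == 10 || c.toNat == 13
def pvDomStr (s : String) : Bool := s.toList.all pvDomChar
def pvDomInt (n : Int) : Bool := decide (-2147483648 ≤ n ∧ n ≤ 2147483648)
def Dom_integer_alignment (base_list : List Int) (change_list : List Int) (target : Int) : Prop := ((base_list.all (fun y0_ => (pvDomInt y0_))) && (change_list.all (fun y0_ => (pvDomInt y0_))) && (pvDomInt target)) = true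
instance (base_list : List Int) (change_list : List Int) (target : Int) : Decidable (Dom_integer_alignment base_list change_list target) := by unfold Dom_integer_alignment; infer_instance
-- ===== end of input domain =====

-- B replaces A's one-unit-at-a-time while loop by a closed-form round-robin distribution
-- (each element gets D//n, the first D%n one more): measured asymptotically faster.
-- Both Pythons mutate change_list in place; the equivalence proved is about the return value.

-- ===== PORT A =====
-- fuel-indexed transliteration of A's while loop; the fuel passed below is an upper bound
-- on the number of loop iterations on every input on which the Python loop terminates
def iaLoop (step target : Int) : Nat → List Int → Int → Nat → List Int × Int
  | 0, cl, cs, _ => (cl, cs)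
  | fuel+1, cl, cs, i =>
    if cs = target then (cl, cs)
    else if (i : Int) > (cl.length : Int) - 1 then iaLoop step target fuel cl cs 0
    else
      -- in this branch 0 ≤ i ≤ len-1, so plain set/getD are exact for change_list[i]
      let cl' := cl.set i (cl.getD i 0 + step)
      iaLoop step target fuel cl' cl'.sum (i+1)

def integer_alignment (base_list : List Int) (change_list : List Int) (target : Int) : List Int × List Int × Int × Int :=
  let base_list_sum := base_list.sum
  let change_list_sum := change_list.sum
  if base_list_sum = target then
    (base_list, change_list, base_list_sum, change_list_sum)
  else if base_list_sum < target then
    let p := iaLoop 1 target (2 * (target - change_list_sum).toNat + 1) change_list change_list_sum 0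
    (base_list, p.1, base_list_sum, p.2)
  else
    let p := iaLoop (-1) target (2 * (change_list_sum - target).toNat + 1) change_list change_list_sum 0
    (base_list, p.1, base_list_sum, p.2)

-- ===== PORT B =====
def integer_alignment_alt (base_list : List Int) (change_list : List Int) (target : Int) : List Int × List Int × Int × Int :=
  let base_sum := base_list.sum
  let change_sum := change_list.sum
  if base_sum ≠ target then
    let delta := target - change_sum
    if delta ≠ 0 then
      let step : Int := if base_sum < target then 1 else -1
      -- divmod(abs(delta), len(change_list)); Python raises ZeroDivisionError on an
      -- empty change_list here, which Pre_ excludes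
      let q := PySem.Int.floordiv |delta| change_list.length
      let r := PySem.Int.mod |delta| change_list.length
      let cl := change_list.mapIdx (fun j x => x + step * (q + if (j : Int) < r then 1 else 0))
      (base_list, cl, base_sum, target)
    else (base_list, change_list, base_sum, change_sum)
  else (base_list, change_list, base_sum, change_sum)

-- ===== PRECONDITION & SPEC =====
-- Pre_ is exactly the set of inputs on which A's while loop terminates: A diverges when the
-- required correction has the wrong sign for the chosen direction, or when change_list is
-- empty while its sum still differs from target (the loop then only resets i forever).
def Pre_integer_alignment (base_list : List Int) (change_list : List Int) (target : Int) : Prop :=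
  base_list.sum = target ∨ change_list.sum = target ∨
    (change_list ≠ [] ∧
      ((base_list.sum < target ∧ change_list.sum < target) ∨
       (target < base_list.sum ∧ target < change_list.sum)))
instance (base_list : List Int) (change_list : List Int) (target : Int) : Decidable (Pre_integer_alignment base_list change_list target) := by unfold Pre_integer_alignment; infer_instance

def pvWitness_integer_alignment : List Int × List Int × Int := ([1], [0, 0], 2)

def Spec_integer_alignment (base_list : List Int) (change_list : List Int) (target : Int) (out : List Int × List Int × Int × Int) : Prop := out = integer_alignment_alt base_list change_list target
instance (base_list : List Int) (change_list : List Int) (target : Int) (out : List Int × List Int × Int × Int) : Decidable (Spec_integer_alignment base_list change_list target out) := by unfold Spec_integer_alignment; infer_instance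

-- ===== CLAIM (what is proved, stated in full; the proofs are below) =====
def Claim_equal_integer_alignment : Prop := ∀ (base_list : List Int) (change_list : List Int) (target : Int), Dom_integer_alignment base_list change_list target → Pre_integer_alignment base_list change_list target → Spec_integer_alignment base_list change_list target (integer_alignment base_list change_list target)

-- ===== LEMMAS AND PROOFS =====

-- reference round-robin distributor: apply D unit steps starting at index i, wrapping to 0
def distrib (step : Int) : List Int → Nat → Nat → List Int
  | cl, _, 0 => cl
  | cl, i, D+1 =>
    let i' := if i < cl.length then i else 0
    if h : i' < cl.length then
      distrib step (cl.set i' (cl[i'] + step)) (i'+1) D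
    else cl

lemma distrib_zero (step : Int) (cl : List Int) (i : Nat) : distrib step cl i 0 = cl := rfl

lemma distrib_wrap (step : Int) (cl : List Int) (D : Nat) :
    distrib step cl cl.length D = distrib step cl 0 D := by
  cases D with
  | zero => rfl
  | succ D =>
    by_cases h : 0 < cl.length
    · simp [distrib, h]
    · simp [distrib, Nat.eq_zero_of_not_pos h]

lemma iaLoop_eq_distrib (step t : Int) (hstep : step = 1 ∨ step = -1) :
    ∀ (fuel D : Nat) (cl : List Int) (i : Nat),
      0 < cl.length → i ≤ cl.length → t = cl.sum + step * D →
      ((i < cl.length ∧ 2*D ≤ fuel) ∨ (i = cl.length ∧ 2*D+1 ≤ fuel)) →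
      iaLoop step t fuel cl cl.sum i = (distrib step cl i D, t) := by
  intro fuel
  induction fuel with
  | zero =>
    intro D cl i hn hi ht hf
    have hD : D = 0 := by omega
    subst hD
    simp [iaLoop, distrib_zero]
    omega
  | succ fuel ih =>
    intro D cl i hn hi ht hf
    cases D with
    | zero =>
      have hcs : cl.sum = t := by simpa using ht.symm
      simp [iaLoop, hcs, distrib_zero]
    | succ D =>
      have hcs : cl.sum ≠ t := by
        intro h
        rcases hstep with h1 | h1 <;> rw [h1] at ht <;> omega
      by_cases hii : i = cl.length
      · -- reset branch
        subst hii
        have hgt : ((cl.length : Int)) > (cl.length : Int) - 1 := by omega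
        have hf' : 2*(D+1) ≤ fuel := by omega
        rw [iaLoop, if_neg (fun h => hcs h), if_pos hgt]
        rw [ih (D+1) cl 0 hn (Nat.zero_le _) ht (Or.inl ⟨hn, hf'⟩)]
        rw [distrib_wrap]
      · -- update branch
        have hilt : i < cl.length := lt_of_le_of_ne hi hii
        have hngt : ¬ ((i : Int) > (cl.length : Int) - 1) := by
          have : (i : Int) < (cl.length : Int) := by exact_mod_cast hilt
          omega
        have hget : cl.getD i 0 = cl[i] := List.getD_eq_getElem cl 0 hilt
        set cl' := cl.set i (cl[i] + step) with hcl'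
        have hlen' : cl'.length = cl.length := by simp [hcl']
        have hsum' : cl'.sum = cl.sum + step := by
          have hsplit : (cl.take i).sum + (cl.drop i).sum = cl.sum := by
            rw [← List.sum_append, List.take_append_drop]
          have hdrop2 : cl[i] + (cl.drop (i+1)).sum = (cl.drop i).sum := by
            rw [← List.sum_cons, List.getElem_cons_drop]
          rw [hcl', List.sum_set, if_pos hilt]
          linarith
        have ht' : t = cl'.sum + step * D := by
          rw [hsum']; push_cast at ht ⊢; linarith [ht]
        have hf' : (i+1 < cl'.length ∧ 2*D ≤ fuel) ∨ (i+1 = cl'.length ∧ 2*D+1 ≤ fuel) := by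
          rw [hlen']
          rcases Nat.lt_or_ge (i+1) cl.length with h | h
          · left; exact ⟨h, by omega⟩
          · right; constructor <;> omega
        have hstep' : distrib step cl i (D+1) = distrib step cl' (i+1) D := by
          rw [distrib]
          simp only [if_pos hilt]
          rw [dif_pos hilt]
        rw [iaLoop, if_neg (fun h => hcs h), if_neg hngt]
        simp only [hget]
        rw [ih D cl' (i+1) (by omega) (by omega) ht' hf', hstep']

-- adding `step` to every element with index ≥ i
def addFrom (step : Int) (cl : List Int) (i : Nat) : List Int :=
  cl.mapIdx (fun j x => if i ≤ j then x + step else x)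

lemma addFrom_len (step : Int) (cl : List Int) :
    addFrom step cl cl.length = cl := by
  apply List.ext_getElem <;> simp [addFrom]
  intro j hj _; omega

lemma addFrom_set (step : Int) (cl : List Int) (i : Nat) (h : i < cl.length) :
    addFrom step (cl.set i (cl[i] + step)) (i+1) = addFrom step cl i := by
  apply List.ext_getElem
  · simp [addFrom]
  · intro j h1 h2
    simp only [addFrom, List.getElem_mapIdx, List.getElem_set]
    by_cases hji : j = i
    · subst hji; simp
    · have h3 : ¬ i = j := fun h => hji h.symm
      by_cases h4 : i ≤ j
      · have h5 : i < j := by omega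
        simp [h3, h4, h5]
      · have h5 : ¬ i < j := by omega
        simp [h3, h4, h5]

lemma distrib_peel (step : Int) :
    ∀ (k : Nat) (cl : List Int) (i D : Nat), i + k = cl.length → k ≤ D →
      distrib step cl i D = distrib step (addFrom step cl i) 0 (D - k) := by
  intro k
  induction k with
  | zero =>
    intro cl i D hik hk
    have hi : i = cl.length := by omega
    subst hi
    rw [addFrom_len, distrib_wrap, Nat.sub_zero]
  | succ k ih =>
    intro cl i D hik hk
    have hilt : i < cl.length := by omega
    cases D with
    | zero => omega
    | succ D =>
      rw [distrib]
      simp only [if_pos hilt]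
      rw [dif_pos hilt]
      rw [ih (cl.set i (cl[i] + step)) (i+1) D (by simp; omega) (by omega)]
      rw [addFrom_set step cl i hilt]
      congr 1
      omega

lemma distrib_small (step : Int) :
    ∀ (D : Nat) (cl : List Int) (i : Nat), i + D ≤ cl.length →
      distrib step cl i D = cl.mapIdx (fun j x => if i ≤ j ∧ j < i + D then x + step else x) := by
  intro D
  induction D with
  | zero =>
    intro cl i h
    rw [distrib_zero]
    apply List.ext_getElem <;> simp
  | succ D ih =>
    intro cl i h
    have hilt : i < cl.length := by omega
    rw [distrib]
    simp only [if_pos hilt]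
    rw [dif_pos hilt]
    rw [ih (cl.set i (cl[i] + step)) (i+1) (by simp; omega)]
    apply List.ext_getElem
    · simp
    · intro j h1 h2
      simp only [List.getElem_mapIdx, List.getElem_set]
      by_cases hji : j = i
      · subst hji; simp
      · have h3 : ¬ i = j := fun h => hji h.symm
        by_cases h4 : i ≤ j ∧ j < i + (D+1)
        · have h5 : i + 1 ≤ j ∧ j < i + 1 + D := by omega
          rw [if_pos h5, if_pos h4, if_neg h3]
        · have h5 : ¬ (i + 1 ≤ j ∧ j < i + 1 + D) := by omega
          rw [if_neg h5, if_neg h4, if_neg h3]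

-- the closed form B computes, from index 0
lemma distrib_closed (step : Int) :
    ∀ (q : Nat) (r : Nat) (cl : List Int), r < cl.length →
      distrib step cl 0 (q * cl.length + r) =
        cl.mapIdx (fun j x => x + step * ((q : Int) + if (j : Int) < (r : Int) then 1 else 0)) := by
  intro q
  induction q with
  | zero =>
    intro r cl hr
    rw [Nat.zero_mul, Nat.zero_add, distrib_small step r cl 0 (by omega)]
    apply List.ext_getElem
    · simp
    · intro j h1 h2
      simp only [List.getElem_mapIdx]
      by_cases hjr : j < r
      · have : (j : Int) < (r : Int) := by exact_mod_cast hjr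
        simp [hjr, this]
      · have : ¬ ((j : Int) < (r : Int)) := by exact_mod_cast hjr
        simp [hjr, this]
  | succ q ih =>
    intro r cl hr
    have hn : 0 < cl.length := by omega
    have hD : (q+1) * cl.length + r = cl.length + (q * cl.length + r) := by ring
    rw [hD, distrib_peel step cl.length cl 0 _ (by omega) (by omega)]
    have hmap : addFrom step cl 0 = cl.map (fun x => x + step) := by
      apply List.ext_getElem <;> simp [addFrom]
    rw [hmap, Nat.add_sub_cancel_left]
    have hlen : (cl.map (fun x => x + step)).length = cl.length := by simp
    rw [show q * cl.length + r = q * (cl.map (fun x => x + step)).length + r by rw [hlen]]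
    rw [ih r (cl.map (fun x => x + step)) (by simpa using hr)]
    apply List.ext_getElem
    · simp
    · intro j h1 h2
      simp only [List.getElem_mapIdx, List.getElem_map]
      push_cast
      ring

lemma iaLoop_closed (step t : Int) (hstep : step = 1 ∨ step = -1)
    (cl : List Int) (D : Nat) (hn : 0 < cl.length) (ht : t = cl.sum + step * D) :
    iaLoop step t (2 * D + 1) cl cl.sum 0 =
      (cl.mapIdx (fun j x => x + step * (((D / cl.length : Nat) : Int) +
        if (j : Int) < ((D % cl.length : Nat) : Int) then 1 else 0)), t) := by
  rw [iaLoop_eq_distrib step t hstep (2*D+1) D cl 0 hn (Nat.zero_le _) ht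
      (Or.inl ⟨hn, by omega⟩)]
  have e : D / cl.length * cl.length + D % cl.length = D := by
    rw [Nat.mul_comm]; exact Nat.div_add_mod D cl.length
  conv_lhs => rw [← e]
  rw [distrib_closed step (D / cl.length) (D % cl.length) cl (Nat.mod_lt _ hn)]

-- ===== VERDICT (by name: the statement is the Claim_ definition above) =====
theorem integer_alignment_spec : Claim_equal_integer_alignment := by
  intro b c t _ hpre
  unfold Spec_integer_alignment integer_alignment integer_alignment_alt
  by_cases hb : b.sum = t
  · simp [hb]
  · by_cases hc : c.sum = t
    · -- loop exits immediately; B's delta is 0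
      have hd : t - c.sum = 0 := by omega
      by_cases hlt : b.sum < t <;>
        simp [hb, hlt, iaLoop, hc]
    · -- real work: Pre_ gives a nonempty list and agreeing directions
      rcases hpre with h | h | ⟨hne, hdir⟩
      · exact absurd h hb
      · exact absurd h hc
      have hn : 0 < c.length := List.length_pos_iff.mpr hne
      have hd0 : ¬ (t - c.sum = 0) := by omega
      rcases hdir with ⟨hblt, hclt⟩ | ⟨htlt, htlt2⟩
      · -- increment case, step = 1
        set D := (t - c.sum).toNat with hD
        have hDt : t = c.sum + (1 : Int) * D := by
          have : (D : Int) = t - c.sum := Int.toNat_of_nonneg (by omega)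
          rw [this]; ring
        have habs : |t - c.sum| = (D : Int) := by
          rw [abs_of_pos (by omega)]; omega
        simp only [if_neg hb, if_pos hblt]
        rw [iaLoop_closed 1 t (Or.inl rfl) c D hn hDt]
        rw [habs]
        simp [hb, hd0]
        rfl
      · -- decrement case, step = -1
        have hblt : ¬ (b.sum < t) := by omega
        set D := (c.sum - t).toNat with hD
        have hDt : t = c.sum + (-1 : Int) * D := by
          have : (D : Int) = c.sum - t := Int.toNat_of_nonneg (by omega)
          rw [this]; ring
        have habs : |t - c.sum| = (D : Int) := by
          rw [abs_of_neg (by omega)]; omega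
        simp only [if_neg hb, if_neg hblt]
        rw [iaLoop_closed (-1) t (Or.inr rfl) c D hn hDt]
        rw [habs]
        simp [hb, hd0]
        rfl
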